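-- pv_equiv track=rewrite | github.com/PeerInfinity/Archipelago-CC | scripts/lib/test_utils.py | count_errors_and_warnings
-- ===== SOURCE A (Python) =====
-- from typing import Dict, List, Optional, Tuple
--
-- def count_errors_and_warnings(text: str) -> Tuple[int, int, Optional[str], Optional[str]]:
--     """
--     Count occurrences of 'error' and 'warning' in text (case insensitive).
--     Ignores lines that start with "[SKIP]", contain "Error Logs:", or "No errors detected" to avoid false positives.
--     Returns tuple of (error_count, warning_count, first_error_line, first_warning_line).
--     """
--     lines = text.split('\n')
--     error_count = 0
--     warning_count = 0
--     first_error_line = None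
--     first_warning_line = None
--
--     for line in lines:
--         line_stripped = line.strip()
--         line_lower = line_stripped.lower()
--
--         # Skip lines that are false positives
--         if (line_stripped.startswith('[SKIP]') or
--             'error logs:' in line_lower or
--             'no errors detected' in line_lower):
--             continue
--
--         if 'error' in line_lower:
--             error_count += 1
--             if first_error_line is None:
--                 first_error_line = line_stripped
--         if 'warning' in line_lower:
--             warning_count += 1
--             if first_warning_line is None:
--                 first_warning_line = line_stripped
--
--     return error_count, warning_count, first_error_line, first_warning_line
-- ===== SOURCE B (Python) =====
-- def count_errors_and_warnings(text):
--     def classify(line):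
--         s = line.strip()
--         low = s.lower()
--         if (s.startswith('[SKIP]') or 'error logs:' in low
--                 or 'no errors detected' in low):
--             return (0, 0, None, None)
--         e = 'error' in low
--         w = 'warning' in low
--         return (1 if e else 0, 1 if w else 0, s if e else None, s if w else None)
--
--     def merge(l, r):
--         return (l[0] + r[0], l[1] + r[1],
--                 l[2] if l[2] is not None else r[2],
--                 l[3] if l[3] is not None else r[3])
--
--     def solve(seg):
--         if not seg:
--             return (0, 0, None, None)
--         if len(seg) == 1:
--             return classify(seg[0])
--         m = len(seg) // 2
--         return merge(solve(seg[:m]), solve(seg[m:]))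
--
--     return solve(text.split('\n'))
-- ===== Notes on version B (the rewrite author's own statement) =====
-- stated objective: alternative
-- what changed: Replaces A's single left-to-right loop carrying four accumulators by a divide-and-conquer: each line is classified into a (count,count,first,first) summary and halves are combined with an associative merge, the counts added and the firsts taken left-preferring.
import Mathlib
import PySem

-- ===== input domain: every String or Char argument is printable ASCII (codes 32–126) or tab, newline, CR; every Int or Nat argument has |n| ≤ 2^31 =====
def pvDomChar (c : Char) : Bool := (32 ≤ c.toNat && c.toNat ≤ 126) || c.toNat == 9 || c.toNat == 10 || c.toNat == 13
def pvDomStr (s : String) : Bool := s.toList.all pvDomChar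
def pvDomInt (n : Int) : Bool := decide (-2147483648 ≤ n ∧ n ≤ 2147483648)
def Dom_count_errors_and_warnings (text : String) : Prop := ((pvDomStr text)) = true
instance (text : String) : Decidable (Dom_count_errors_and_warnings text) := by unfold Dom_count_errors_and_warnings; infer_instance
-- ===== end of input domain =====

-- B replaces A's single accumulator loop by a divide-and-conquer with an associative merge (alternative decomposition, same cost).

-- ===== PORT A =====
-- text.split('\n'); split? returns some since the separator "\n" is nonempty, so getD [] is exact
def pvLines (text : String) : List String := (PySem.Str.split? text "\n").getD []
-- the skip test on the stripped line (A's `continue` condition)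
def pvSkip (ls : String) : Bool :=
  PySem.Str.startswith ls "[SKIP]" ||
  PySem.Str.isIn "error logs:" (PySem.Str.lower ls) ||
  PySem.Str.isIn "no errors detected" (PySem.Str.lower ls)

-- A's loop body: one stripped-and-lowered line updates the four accumulators
def pvStepA (st : Int × Int × Option String × Option String) (line : String) :
    Int × Int × Option String × Option String :=
  let ls := PySem.Str.strip line
  let ll := PySem.Str.lower ls
  if pvSkip ls then st
  else
    let st1 : Int × Int × Option String × Option String :=
      if PySem.Str.isIn "error" ll then
        (st.1 + 1, st.2.1, (match st.2.2.1 with | none => some ls | some x => some x), st.2.2.2)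
      else st
    if PySem.Str.isIn "warning" ll then
      (st1.1, st1.2.1 + 1, st1.2.2.1, (match st1.2.2.2 with | none => some ls | some x => some x))
    else st1

def count_errors_and_warnings (text : String) : Int × Int × Option String × Option String :=
  (pvLines text).foldl pvStepA (0, 0, none, none)

-- ===== PORT B =====
-- B's skip test, written inline in classify in Source B
def pvSkipB (s low : String) : Bool :=
  PySem.Str.startswith s "[SKIP]" ||
  PySem.Str.isIn "error logs:" low ||
  PySem.Str.isIn "no errors detected" low

-- B's classify: one line's summary (counts 0/1, first-line candidates)
def pvClassify (line : String) : Int × Int × Option String × Option String :=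
  let s := PySem.Str.strip line
  let low := PySem.Str.lower s
  if pvSkipB s low then (0, 0, none, none)
  else
    let e := PySem.Str.isIn "error" low
    let w := PySem.Str.isIn "warning" low
    ((if e then 1 else 0), (if w then 1 else 0),
     (if e then some s else none), (if w then some s else none))

-- B's merge: add the counts, keep the left first-line when present
def pvMerge (l r : Int × Int × Option String × Option String) :
    Int × Int × Option String × Option String :=
  (l.1 + r.1, l.2.1 + r.2.1,
   (match l.2.2.1 with | some x => some x | none => r.2.2.1),
   (match l.2.2.2 with | some x => some x | none => r.2.2.2))

-- B's solve: divide and conquer over the segment of lines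
def pvSolve (seg : List String) : Int × Int × Option String × Option String :=
  match seg with
  | [] => (0, 0, none, none)
  | [x] => pvClassify x
  | x :: y :: rest =>
      let m := (x :: y :: rest).length / 2
      pvMerge (pvSolve ((x :: y :: rest).take m)) (pvSolve ((x :: y :: rest).drop m))
termination_by seg.length
decreasing_by
  · simp [List.length_take]; omega
  · simp; omega

def count_errors_and_warnings_alt (text : String) : Int × Int × Option String × Option String :=
  pvSolve (pvLines text)

-- ===== PRECONDITION & SPEC =====
def Spec_count_errors_and_warnings (text : String) (out : Int × Int × Option String × Option String) : Prop := out = count_errors_and_warnings_alt text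
instance (text : String) (out : Int × Int × Option String × Option String) : Decidable (Spec_count_errors_and_warnings text out) := by unfold Spec_count_errors_and_warnings; infer_instance

-- ===== CLAIM (what is proved, stated in full; the proofs are below) =====
def Claim_equal_count_errors_and_warnings : Prop := ∀ (text : String), Dom_count_errors_and_warnings text → Spec_count_errors_and_warnings text (count_errors_and_warnings text)

-- ===== LEMMAS AND PROOFS =====
-- A's whole loop result, used as the common reference point
def pvLinear (seg : List String) : Int × Int × Option String × Option String :=
  seg.foldl pvStepA (0, 0, none, none)

theorem pvMerge_id_right (st : Int × Int × Option String × Option String) :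
    pvMerge st (0, 0, none, none) = st := by
  obtain ⟨ec, wc, fe, fw⟩ := st
  cases fe <;> cases fw <;> simp [pvMerge]

theorem pvMerge_id_left (st : Int × Int × Option String × Option String) :
    pvMerge (0, 0, none, none) st = st := by
  obtain ⟨ec, wc, fe, fw⟩ := st
  simp [pvMerge]

theorem pvMerge_assoc (a b c : Int × Int × Option String × Option String) :
    pvMerge (pvMerge a b) c = pvMerge a (pvMerge b c) := by
  obtain ⟨_, _, fe, fw⟩ := a
  cases fe <;> cases fw <;> simp [pvMerge, add_assoc]

-- A's step is exactly "merge in one line's classification"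
theorem pvSkipB_eq (s : String) : pvSkipB s (PySem.Str.lower s) = pvSkip s := rfl

theorem pvStepA_eq_merge (st : Int × Int × Option String × Option String) (line : String) :
    pvStepA st line = pvMerge st (pvClassify line) := by
  obtain ⟨ec, wc, fe, fw⟩ := st
  simp only [pvStepA, pvClassify, pvSkipB_eq]
  by_cases hs : pvSkip (PySem.Str.strip line) = true <;>
  by_cases he : PySem.Str.isIn "error" (PySem.Str.lower (PySem.Str.strip line)) = true <;>
  by_cases hw : PySem.Str.isIn "warning" (PySem.Str.lower (PySem.Str.strip line)) = true <;>
  simp only [Bool.not_eq_true] at hs he hw <;>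
  cases fe <;> cases fw <;>
  simp only [hs, he, hw, pvMerge, Bool.false_eq_true, reduceIte] <;> simp

theorem pvLinear_foldl (seg : List String) (st : Int × Int × Option String × Option String) :
    seg.foldl pvStepA st = pvMerge st (pvLinear seg) := by
  induction seg generalizing st with
  | nil => simp [pvLinear, pvMerge_id_right]
  | cons h t ih =>
    have hlin : pvLinear (h :: t) = pvMerge (pvClassify h) (pvLinear t) := by
      simp only [pvLinear, List.foldl_cons]
      rw [ih, pvStepA_eq_merge, pvMerge_id_left]; rfl
    rw [List.foldl_cons, ih, pvStepA_eq_merge, hlin, pvMerge_assoc]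

theorem pvLinear_append (a b : List String) :
    pvLinear (a ++ b) = pvMerge (pvLinear a) (pvLinear b) := by
  simp only [pvLinear, List.foldl_append]
  rw [pvLinear_foldl b]
  rfl

theorem pvSolve_eq_linear (seg : List String) : pvSolve seg = pvLinear seg := by
  induction seg using pvSolve.induct with
  | case1 => rw [pvSolve]; rfl
  | case2 x =>
    rw [pvSolve]
    simp [pvLinear, pvStepA_eq_merge, pvMerge_id_left]
  | case3 x y rest m ih1 ih2 =>
    rw [pvSolve]
    rw [ih1, ih2, ← pvLinear_append, List.take_append_drop]

-- ===== VERDICT (by name: the statement is the Claim_ definition above) =====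
theorem count_errors_and_warnings_spec : Claim_equal_count_errors_and_warnings := by
  intro text _
  unfold Spec_count_errors_and_warnings count_errors_and_warnings count_errors_and_warnings_alt
  rw [pvSolve_eq_linear]
  rfl
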